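-- pv_equiv track=rewrite | github.com/7ywx/leetcode | pdd_exam.py | count_visible_students2
-- ===== SOURCE A (Python) =====
-- def count_visible_students2(heights):
--    ans = 0
--    for i in range(len(heights)):
--       for j in range(i+1, len(heights)):
--          if heights[i] >= heights[j]:
--             ans += 1
--          else:
--             ans += 1
--             break
--    return ans
-- ===== SOURCE B (Python) =====
-- def count_visible_students2(heights):
--     # One pass with a monotonic (non-increasing) stack: when x arrives, exactly
--     # the elements still on the stack can see x; then heights below x are popped.
--     stack = []
--     ans = 0
--     for x in heights:
--         ans += len(stack)
--         while stack and stack[-1] < x: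
--             stack.pop()
--         stack.append(x)
--     return ans
-- ===== Notes on version B (the rewrite author's own statement) =====
-- stated objective: faster
-- what changed: Replaced the O(n^2) nested scan (for each i, walk right until the first taller student) by a single left-to-right pass with a monotonic non-increasing stack: each arriving element is seen by exactly the elements still on the stack, then shorter stack entries are popped.
import Mathlib
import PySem

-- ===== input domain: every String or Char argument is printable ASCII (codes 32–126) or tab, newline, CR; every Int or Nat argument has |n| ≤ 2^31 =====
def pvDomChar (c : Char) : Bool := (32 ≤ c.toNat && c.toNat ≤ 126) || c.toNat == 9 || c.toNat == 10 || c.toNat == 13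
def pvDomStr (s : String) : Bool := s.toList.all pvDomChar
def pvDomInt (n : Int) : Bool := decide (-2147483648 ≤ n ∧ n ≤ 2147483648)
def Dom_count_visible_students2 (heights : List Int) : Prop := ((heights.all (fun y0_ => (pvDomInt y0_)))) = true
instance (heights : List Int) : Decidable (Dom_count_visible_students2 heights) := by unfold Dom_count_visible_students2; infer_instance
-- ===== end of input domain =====

-- B replaces A's quadratic nested scan by one monotonic-stack pass (asymptotically faster).

-- ===== PORT A =====
-- inner 'for j' loop with its break: recursion over the j-range, returning on break
def pvInnerA (heights : List Int) (hi : Int) : List Int → Int → Int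
  | [], ans => ans
  | j :: rest, ans =>
    if hi ≥ PySem.List.pyGetD heights j 0 then pvInnerA heights hi rest (ans + 1)
    else ans + 1

def count_visible_students2 (heights : List Int) : Int :=
  (PySem.List.pyRange 0 (heights.length : Int) 1).foldl
    (fun ans i =>
      pvInnerA heights (PySem.List.pyGetD heights i 0)
        (PySem.List.pyRange (i + 1) (heights.length : Int) 1) ans) 0

-- ===== PORT B =====
-- 'while stack and stack[-1] < x: stack.pop()' — head of the Lean list is the stack top
def pvBGo : List Int → List Int → Int → Int
  | [], _, ans => ans
  | x :: rest, stack, ans =>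
      pvBGo rest (x :: stack.dropWhile (fun y => decide (y < x))) (ans + (stack.length : Int))

def count_visible_students2_alt (heights : List Int) : Int := pvBGo heights [] 0

-- ===== PRECONDITION & SPEC =====
def Spec_count_visible_students2 (heights : List Int) (out : Int) : Prop := out = count_visible_students2_alt heights
instance (heights : List Int) (out : Int) : Decidable (Spec_count_visible_students2 heights out) := by unfold Spec_count_visible_students2; infer_instance

-- ===== CLAIM (what is proved, stated in full; the proofs are below) =====
def Claim_equal_count_visible_students2 : Prop := ∀ (heights : List Int), Dom_count_visible_students2 heights → Spec_count_visible_students2 heights (count_visible_students2 heights)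

-- ===== LEMMAS AND PROOFS =====

-- count of students i sees in the tail: all until (and including) the first taller one
def pvCnt (hi : Int) : List Int → Int
  | [] => 0
  | x :: r => if hi ≥ x then 1 + pvCnt hi r else 1

-- common spec: sum of pvCnt over every suffix head
def pvSpecF : List Int → Int
  | [] => 0
  | x :: r => pvCnt x r + pvSpecF r

theorem pvInnerA_eq (xs : List Int) (hi : Int) :
    ∀ (k : Nat) (a : Int) (ans : Int), 0 ≤ a → k = xs.length - a.toNat →
      pvInnerA xs hi (PySem.List.pyRange a (xs.length : Int) 1) ans
        = ans + pvCnt hi (xs.drop a.toNat) := by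
  intro k
  induction k with
  | zero =>
    intro a ans ha hk
    have hge : (xs.length : Int) ≤ a := by omega
    rw [PySem.List.pyRange_one_eq_nil hge, List.drop_eq_nil_of_le (by omega)]
    simp [pvInnerA, pvCnt]
  | succ n ih =>
    intro a ans ha hk
    have hlt : a < (xs.length : Int) := by omega
    have hnat : a.toNat < xs.length := by omega
    rw [PySem.List.pyRange_one_cons hlt,
        List.drop_eq_getElem_cons hnat]
    have hget : PySem.List.pyGetD xs a 0 = xs[a.toNat] :=
      PySem.List.pyGetD_eq_getElem xs 0 ha hlt
    have ha1 : (a + 1).toNat = a.toNat + 1 := by omega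
    by_cases hcmp : hi ≥ xs[a.toNat]
    · rw [show pvInnerA xs hi (a :: PySem.List.pyRange (a+1) (xs.length : Int) 1) ans
          = pvInnerA xs hi (PySem.List.pyRange (a+1) (xs.length : Int) 1) (ans + 1) from by
            simp [pvInnerA, hget, hcmp]]
      rw [ih (a+1) (ans+1) (by omega) (by omega), ha1]
      simp [pvCnt, hcmp]
      ring
    · rw [show pvInnerA xs hi (a :: PySem.List.pyRange (a+1) (xs.length : Int) 1) ans
          = ans + 1 from by simp [pvInnerA, hget, hcmp]]
      simp [pvCnt, hcmp]

theorem countA_eq_specF (xs : List Int) :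
    ∀ (k : Nat) (a : Int) (ans : Int), 0 ≤ a → k = xs.length - a.toNat →
      (PySem.List.pyRange a (xs.length : Int) 1).foldl
        (fun ans i =>
          pvInnerA xs (PySem.List.pyGetD xs i 0)
            (PySem.List.pyRange (i + 1) (xs.length : Int) 1) ans) ans
        = ans + pvSpecF (xs.drop a.toNat) := by
  intro k
  induction k with
  | zero =>
    intro a ans ha hk
    have hge : (xs.length : Int) ≤ a := by omega
    rw [PySem.List.pyRange_one_eq_nil hge, List.drop_eq_nil_of_le (by omega)]
    simp [pvSpecF]
  | succ n ih =>
    intro a ans ha hk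
    have hlt : a < (xs.length : Int) := by omega
    have hnat : a.toNat < xs.length := by omega
    have ha1 : (a + 1).toNat = a.toNat + 1 := by omega
    rw [PySem.List.pyRange_one_cons hlt, List.foldl_cons,
        pvInnerA_eq xs (PySem.List.pyGetD xs a 0) (xs.length - (a+1).toNat) (a+1) ans
          (by omega) rfl,
        ih (a+1) _ (by omega) (by omega),
        List.drop_eq_getElem_cons hnat,
        PySem.List.pyGetD_eq_getElem xs 0 ha hlt, ha1]
    simp [pvSpecF]
    ring

theorem dropWhile_eq_filter_sorted (x : Int) :
    ∀ (st : List Int), st.Pairwise (· ≤ ·) →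
      st.dropWhile (fun y => decide (y < x)) = st.filter (fun y => decide (x ≤ y))
  | [], _ => rfl
  | y :: s, h => by
    by_cases hy : y < x
    · simp only [List.dropWhile_cons, List.filter_cons, hy, decide_true, decide_eq_true_eq]
      rw [dropWhile_eq_filter_sorted x s h.of_cons]
      simp [show ¬ (x ≤ y) by omega]
    · simp only [List.dropWhile_cons, List.filter_cons, hy, decide_false,
        decide_eq_true_eq, Bool.false_eq_true, if_false]
      rw [if_pos (by omega)]
      congr 1
      exact (List.filter_eq_self.mpr (fun z hz => by
        have := (List.pairwise_cons.mp h).1 z hz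
        simp; omega)).symm

theorem sum_cnt_cons (x : Int) (r : List Int) :
    ∀ (st : List Int),
      ((st.map (fun y => pvCnt y (x :: r))).sum : Int)
        = (st.length : Int) + ((st.filter (fun y => decide (x ≤ y))).map (fun y => pvCnt y r)).sum
  | [] => by simp
  | y :: s => by
    have ih := sum_cnt_cons x r s
    simp only [List.map_cons, List.sum_cons, List.filter_cons, List.length_cons]
    rw [ih]
    by_cases hy : x ≤ y
    · rw [show pvCnt y (x :: r) = 1 + pvCnt y r from by simp [pvCnt]; omega,
        if_pos (by simpa using hy)]
      simp only [List.map_cons, List.sum_cons]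
      push_cast
      ring
    · rw [show pvCnt y (x :: r) = 1 from by simp [pvCnt]; omega,
        if_neg (by simpa using hy)]
      push_cast
      ring

theorem pvBGo_eq (t : List Int) :
    ∀ (st : List Int) (ans : Int), st.Pairwise (· ≤ ·) →
      pvBGo t st ans = ans + (st.map (fun y => pvCnt y t)).sum + pvBGo t [] 0 := by
  induction t with
  | nil => intro st ans _; simp [pvBGo, pvCnt]
  | cons x rest ih =>
    intro st ans hsort
    have hdf := dropWhile_eq_filter_sorted x st hsort
    have hsort' : (x :: st.dropWhile (fun y => decide (y < x))).Pairwise (· ≤ ·) := by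
      rw [hdf]
      refine List.pairwise_cons.mpr ⟨fun z hz => ?_, hsort.filter _⟩
      have := List.of_mem_filter hz
      simpa using this
    have h1 : pvBGo (x :: rest) st ans
        = pvBGo rest (x :: st.dropWhile (fun y => decide (y < x))) (ans + (st.length : Int)) := rfl
    rw [h1, ih _ _ hsort', hdf]
    have h2 : pvBGo (x :: rest) [] 0 = pvBGo rest [x] 0 := by simp [pvBGo]
    rw [h2, ih [x] 0 (by simp)]
    simp only [List.map_cons, List.sum_cons, List.map_nil, List.sum_nil]
    rw [sum_cnt_cons x rest st]
    ring

theorem countB_eq_specF : ∀ (t : List Int), pvBGo t [] 0 = pvSpecF t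
  | [] => rfl
  | x :: r => by
    have h2 : pvBGo (x :: r) [] 0 = pvBGo r [x] 0 := by simp [pvBGo]
    rw [h2, pvBGo_eq r [x] 0 (by simp), countB_eq_specF r]
    simp [pvSpecF]

-- ===== VERDICT (by name: the statement is the Claim_ definition above) =====
theorem count_visible_students2_spec : Claim_equal_count_visible_students2 := by
  intro heights _
  unfold Spec_count_visible_students2 count_visible_students2 count_visible_students2_alt
  rw [countA_eq_specF heights (heights.length - (0:Int).toNat) 0 0 le_rfl rfl,
      countB_eq_specF]
  simp
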